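-- pv_equiv track=rewrite | github.com/RussB-626/static-site-generator | src/blocknode.py | is_unordered_list_block
-- ===== SOURCE A (Python) =====
-- def is_unordered_list_block(text):
--     if len(text) == 0:
--         return False
--     lines = text.split('\n')
--     for line in lines:
--         if line[:2] != "- ":
--             return False
--     return True
-- ===== SOURCE B (Python) =====
-- def is_unordered_list_block(text):
--     # Single indexed scan: each line must begin "- "; no line list is built.
--     i = 0
--     n = len(text)
--     while True:
--         if text[i:i+2] != "- ":
--             return False
--         i += 2
--         while i < n and text[i] != '\n':
--             i += 1
--         if i == n:
--             return True
--         i += 1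
-- ===== Notes on version B (the rewrite author's own statement) =====
-- stated objective: alternative
-- what changed: Replaces split('\n') plus a per-line slice loop with a single indexed scan over the raw string that checks "- " at the start and after every newline, never materialising the list of lines.
import Mathlib
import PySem

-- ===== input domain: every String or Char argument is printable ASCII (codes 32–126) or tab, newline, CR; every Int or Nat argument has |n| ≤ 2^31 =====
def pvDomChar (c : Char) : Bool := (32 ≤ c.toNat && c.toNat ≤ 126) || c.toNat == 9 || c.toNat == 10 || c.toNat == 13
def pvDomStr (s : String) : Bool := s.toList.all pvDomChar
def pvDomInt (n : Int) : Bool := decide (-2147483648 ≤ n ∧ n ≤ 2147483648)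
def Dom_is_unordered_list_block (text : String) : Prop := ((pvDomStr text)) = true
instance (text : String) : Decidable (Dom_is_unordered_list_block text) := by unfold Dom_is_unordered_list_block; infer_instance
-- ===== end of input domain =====

-- B replaces A's split-into-lines-then-check loop by a single character scan of the raw
-- string checking "- " at the start and after every newline (alternative; no speed claim).


-- ===== PORT A =====
-- 'for line in lines: if line[:2] != "- ": return False' / 'return True'
def pvALoop : List (List Char) → Bool
  | [] => true
  | l :: ls => if PySem.Chars.slice l none (some 2) ≠ ['-', ' '] then false else pvALoop ls

def is_unordered_list_block (text : String) : Bool :=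
  if PySem.Str.len text == 0 then false
  else pvALoop (PySem.Chars.splitOn text.toList ['\n'])

-- ===== PORT B =====
-- pvBCheck: the outer-loop head test 'text[i:i+2] != "- "' at the start of a line;
-- pvBBody: the inner loop advancing to the next newline (or the end of the text).
mutual
  def pvBCheck (cs : List Char) : Bool :=
    if h : cs.take 2 = ['-', ' '] then pvBBody (cs.drop 2) else false
  termination_by (cs.length, 1)
  decreasing_by
    have h2 : 2 ≤ cs.length := by
      have := congrArg List.length h
      simp at this; omega
    simp only [List.length_drop]
    exact Prod.Lex.left _ _ (by omega)
  def pvBBody : List Char → Bool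
    | [] => true
    | c :: rest => if c = '\n' then pvBCheck rest else pvBBody rest
  termination_by cs => (cs.length, 0)
  decreasing_by
    · simp only [List.length_cons]; exact Prod.Lex.left _ _ (by omega)
    · simp only [List.length_cons]; exact Prod.Lex.left _ _ (by omega)
end

def is_unordered_list_block_alt (text : String) : Bool := pvBCheck text.toList

-- ===== PRECONDITION & SPEC =====
def Spec_is_unordered_list_block (text : String) (out : Bool) : Prop := out = is_unordered_list_block_alt text
instance (text : String) (out : Bool) : Decidable (Spec_is_unordered_list_block text out) := by unfold Spec_is_unordered_list_block; infer_instance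

-- ===== CLAIM (what is proved, stated in full; the proofs are below) =====
def Claim_equal_is_unordered_list_block : Prop := ∀ (text : String), Dom_is_unordered_list_block text → Spec_is_unordered_list_block text (is_unordered_list_block text)

-- ===== LEMMAS AND PROOFS =====

-- reference splitting on '\n'
def pvLines : List Char → List (List Char)
  | [] => [[]]
  | c :: rest => if c = '\n' then [] :: pvLines rest
                 else match pvLines rest with
                      | [] => [[c]]
                      | h :: t => (c :: h) :: t

lemma pvLines_ne_nil (cs : List Char) : pvLines cs ≠ [] := by
  induction cs with
  | nil => simp [pvLines]
  | cons c rest ih =>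
    simp only [pvLines]
    split_ifs
    · simp
    · cases h : pvLines rest <;> simp

lemma pvLines_cons_of_ne (c : Char) (rest : List Char) (hc : c ≠ '\n') :
    pvLines (c :: rest) = (c :: (pvLines rest).headI) :: (pvLines rest).tail := by
  simp only [pvLines, if_neg hc]
  cases h : pvLines rest with
  | nil => exact absurd h (pvLines_ne_nil rest)
  | cons hd tl => simp

lemma pvLines_headI (cs : List Char) :
    (pvLines cs).headI = cs.takeWhile (fun c => decide (c ≠ '\n')) := by
  induction cs with
  | nil => simp [pvLines]
  | cons c rest ih =>
    by_cases hc : c = '\n'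
    · subst hc; simp [pvLines]
    · rw [pvLines_cons_of_ne c rest hc]
      simp [hc, ih]

lemma pvGo_eq (fuel : Nat) (l cur : List Char) (acc : List (List Char)) (hf : l.length ≤ fuel) :
    PySem.Chars.splitOn.go ['\n'] fuel l cur acc
      = acc.reverse ++ (pvLines l).modifyHead (cur.reverse ++ ·) := by
  induction fuel generalizing l cur acc with
  | zero =>
    cases l with
    | nil => simp [PySem.Chars.splitOn.go, pvLines]
    | cons c rest => simp at hf
  | succ n ih =>
    cases l with
    | nil => simp [PySem.Chars.splitOn.go, pvLines]
    | cons c rest =>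
      simp only [PySem.Chars.splitOn.go]
      by_cases hc : c = '\n'
      · subst hc
        have hpre : List.isPrefixOf ['\n'] ('\n' :: rest) = true := by
          simp [List.isPrefixOf]
        rw [if_pos hpre]
        simp only [List.length_cons, List.length_nil, List.drop_succ_cons, List.drop_zero]
        rw [ih rest [] (cur.reverse :: acc) (by simpa using Nat.le_of_succ_le_succ hf)]
        simp only [pvLines, List.modifyHead]
        cases h : pvLines rest <;> simp
      · have hpre : List.isPrefixOf ['\n'] (c :: rest) = false := by
          simp [List.isPrefixOf]; exact fun h => absurd h.symm hc
        rw [if_neg (by simp [hpre])]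
        rw [ih rest (c :: cur) acc (by simpa using Nat.le_of_succ_le_succ hf)]
        rw [pvLines_cons_of_ne c rest hc]
        cases h : pvLines rest with
        | nil => exact absurd h (pvLines_ne_nil rest)
        | cons hd tl => simp [List.modifyHead]

lemma pvSplitOn_eq_lines (cs : List Char) :
    PySem.Chars.splitOn cs ['\n'] = pvLines cs := by
  unfold PySem.Chars.splitOn
  rw [pvGo_eq (cs.length + 1) cs [] [] (by omega)]
  cases h : pvLines cs with
  | nil => exact absurd h (pvLines_ne_nil cs)
  | cons hd tl => simp [List.modifyHead]

def pvPred (l : List Char) : Bool := decide (l.take 2 = ['-', ' '])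

lemma pvALoop_eq_all (ls : List (List Char)) : pvALoop ls = ls.all pvPred := by
  induction ls with
  | nil => rfl
  | cons l ls ih =>
    have hsl : PySem.Chars.slice l none (some 2) = l.take 2 := by
      simp only [PySem.Chars.slice_eq_listSlice]
      rw [PySem.List.slice_to l (by norm_num)]
      rfl
    simp only [pvALoop, List.all_cons, ← ih, pvPred, hsl]
    by_cases h : List.take 2 l = ['-', ' '] <;> simp [h]

lemma pvTake2_takeWhile (cs : List Char) :
    (cs.takeWhile (fun c => decide (c ≠ '\n'))).take 2 = ['-', ' '] ↔ cs.take 2 = ['-', ' '] := by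
  cases cs with
  | nil => simp
  | cons a rest =>
    cases rest with
    | nil =>
      by_cases ha : a = '\n' <;> simp [ha]
    | cons b r =>
      by_cases ha : a = '\n'
      · subst ha; simp
      · by_cases hb : b = '\n'
        · subst hb
          simp [ha]
        · simp [ha, hb]

lemma pvScan (n : Nat) : ∀ cs : List Char, cs.length ≤ n →
    pvBCheck cs = (pvLines cs).all pvPred ∧ pvBBody cs = ((pvLines cs).tail).all pvPred := by
  induction n with
  | zero =>
    intro cs h
    have : cs = [] := by cases cs with | nil => rfl | cons c r => simp at h
    subst this
    constructor
    · rw [pvBCheck]; simp [pvLines, pvPred]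
    · rw [pvBBody]; simp [pvLines]
  | succ n ih =>
    intro cs hlen
    constructor
    · rw [pvBCheck]
      by_cases h : cs.take 2 = ['-', ' ']
      · rw [dif_pos h]
        match cs, h with
        | a :: b :: r, h =>
          simp at h
          obtain ⟨ha, hb⟩ := h
          subst ha; subst hb
          simp only [List.drop_succ_cons, List.drop_zero]
          have hr : r.length ≤ n := by simp at hlen; omega
          rw [(ih r hr).2]
          rw [pvLines_cons_of_ne _ _ (by decide), pvLines_cons_of_ne _ _ (by decide)]
          simp [pvPred]
      · rw [dif_neg h]
        have hhead : pvPred (pvLines cs).headI = false := by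
          simp only [pvPred, pvLines_headI, decide_eq_false_iff_not]
          exact fun hh => h ((pvTake2_takeWhile cs).mp hh)
        have hcons : pvLines cs = (pvLines cs).headI :: (pvLines cs).tail := by
          cases hq : pvLines cs with
          | nil => exact absurd hq (pvLines_ne_nil cs)
          | cons hd tl => simp
        rw [hcons, List.all_cons]
        rw [hcons] at hhead
        simp at hhead ⊢
        intro hp
        rw [hp] at hhead
        simp at hhead
    · cases cs with
      | nil => rw [pvBBody]; simp [pvLines]
      | cons c rest =>
        rw [pvBBody]
        have hr : rest.length ≤ n := by simp at hlen; omega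
        by_cases hc : c = '\n'
        · subst hc
          rw [if_pos rfl, (ih rest hr).1]
          simp [pvLines]
        · rw [if_neg hc, (ih rest hr).2, pvLines_cons_of_ne c rest hc]
          simp

lemma pvCheck_eq_all (cs : List Char) : pvBCheck cs = (pvLines cs).all pvPred :=
  (pvScan cs.length cs (le_refl _)).1

-- ===== VERDICT (by name: the statement is the Claim_ definition above) =====
theorem is_unordered_list_block_spec : Claim_equal_is_unordered_list_block := by
  intro text _
  unfold Spec_is_unordered_list_block is_unordered_list_block is_unordered_list_block_alt
  by_cases h : text.toList = []
  · have hl : PySem.Str.len text == 0 := by simp [PySem.Str.len_eq, h]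
    rw [if_pos hl, h, pvBCheck]
    simp
  · have hl : ¬ (PySem.Str.len text == 0) = true := by
      simp [PySem.Str.len_eq]
      exact fun hh => h (by rw [hh]; rfl)
    rw [if_neg hl, pvSplitOn_eq_lines, pvALoop_eq_all, pvCheck_eq_all]
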